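-- pv_equiv track=rewrite | github.com/agatho/ida-wow-analyzer | analyzers/pseudocode_transpiler.py | _opcode_to_method_name
-- ===== SOURCE A (Python) =====
-- def _opcode_to_method_name(opcode_name):
--     """Convert opcode name to TC handler method name.
--
--     CMSG_HOUSING_DECOR_PLACE -> HandleHousingDecorPlace
--     CMSG_QUERY_PLAYER_NAME -> HandleQueryPlayerName
--     """
--     if not opcode_name:
--         return "HandleUnknown"
--
--     name = opcode_name
--     # Remove direction prefix
--     for prefix in ("CMSG_", "SMSG_", "MSG_"):
--         if name.startswith(prefix):
--             name = name[len(prefix):]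
--             break
--
--     # Convert UPPER_SNAKE_CASE to PascalCase
--     parts = name.split('_')
--     pascal = ''.join(p.capitalize() for p in parts if p)
--
--     return f"Handle{pascal}"
-- ===== SOURCE B (Python) =====
-- def _opcode_to_method_name(opcode_name):
--     if not opcode_name:
--         return "HandleUnknown"
--
--     name = opcode_name
--     # Remove direction prefix
--     for prefix in ("CMSG_", "SMSG_", "MSG_"):
--         if name.startswith(prefix):
--             name = name[len(prefix):]
--             break
--
--     # Single pass UPPER_SNAKE_CASE -> PascalCase: no split, no intermediate parts
--     out = []
--     start_of_word = True
--     for ch in name: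
--         if ch == '_':
--             start_of_word = True
--         elif start_of_word:
--             out.append(ch.upper())
--             start_of_word = False
--         else:
--             out.append(ch.lower())
--     return "Handle" + ''.join(out)
-- ===== Notes on version B (the rewrite author's own statement) =====
-- stated objective: alternative
-- what changed: Replaces split('_') + per-part capitalize + join with a single character pass that tracks a start-of-word flag, emitting upper at word starts and lower otherwise; no intermediate parts list is built.
import Mathlib
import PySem

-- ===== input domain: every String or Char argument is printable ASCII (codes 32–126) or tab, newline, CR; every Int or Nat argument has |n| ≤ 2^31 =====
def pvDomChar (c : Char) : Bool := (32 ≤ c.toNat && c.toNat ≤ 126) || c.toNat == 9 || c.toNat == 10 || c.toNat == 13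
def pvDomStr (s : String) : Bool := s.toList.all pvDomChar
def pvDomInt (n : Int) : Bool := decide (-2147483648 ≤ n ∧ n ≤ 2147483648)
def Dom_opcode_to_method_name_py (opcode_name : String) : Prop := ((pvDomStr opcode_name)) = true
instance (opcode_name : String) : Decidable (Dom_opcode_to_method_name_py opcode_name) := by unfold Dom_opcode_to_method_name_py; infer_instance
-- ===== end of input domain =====

-- B replaces A's split/capitalize/join with one start-of-word-flag pass over the characters (alternative decomposition, same cost).

-- ===== PORT A =====
-- p.capitalize(): first char uppercased, the rest lowercased (exact on ASCII via PySem.Chars.upperChar/lowerChar)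
def pvCapitalize (p : List Char) : List Char :=
  match p with
  | [] => []
  | c :: rest => PySem.Chars.upperChar c :: rest.map PySem.Chars.lowerChar

def opcode_to_method_name_py (opcode_name : String) : String :=
  let cs := opcode_name.toList
  if cs = [] then "HandleUnknown"
  else
    -- for prefix in ("CMSG_","SMSG_","MSG_"): strip the first matching prefix, then break
    let name :=
      if PySem.Chars.startswith cs ("CMSG_".toList) then PySem.List.slice cs (some 5) none
      else if PySem.Chars.startswith cs ("SMSG_".toList) then PySem.List.slice cs (some 5) none
      else if PySem.Chars.startswith cs ("MSG_".toList) then PySem.List.slice cs (some 4) none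
      else cs
    let parts := PySem.Chars.splitOn name ['_']
    let pascal := PySem.Chars.join [] ((parts.filter (fun p => p ≠ [])).map pvCapitalize)
    String.mk ("Handle".toList ++ pascal)

-- ===== PORT B =====
-- the for-loop of Source B as a fold over the same state (start_of_word flag, accumulated output chars)
def pvStep (s : Bool × List Char) (ch : Char) : Bool × List Char :=
  if ch = '_' then (true, s.2)
  else if s.1 then (false, s.2 ++ [PySem.Chars.upperChar ch])
  else (s.1, s.2 ++ [PySem.Chars.lowerChar ch])

def opcode_to_method_name_py_alt (opcode_name : String) : String :=
  let cs := opcode_name.toList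
  if cs = [] then "HandleUnknown"
  else
    let name :=
      if PySem.Chars.startswith cs ("CMSG_".toList) then PySem.List.slice cs (some 5) none
      else if PySem.Chars.startswith cs ("SMSG_".toList) then PySem.List.slice cs (some 5) none
      else if PySem.Chars.startswith cs ("MSG_".toList) then PySem.List.slice cs (some 4) none
      else cs
    let st := name.foldl pvStep (true, [])
    String.mk ("Handle".toList ++ st.2)

-- ===== PRECONDITION & SPEC =====
def Spec_opcode_to_method_name_py (opcode_name : String) (out : String) : Prop := out = opcode_to_method_name_py_alt opcode_name
instance (opcode_name : String) (out : String) : Decidable (Spec_opcode_to_method_name_py opcode_name out) := by unfold Spec_opcode_to_method_name_py; infer_instance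

-- ===== CLAIM (what is proved, stated in full; the proofs are below) =====
def Claim_equal_opcode_to_method_name_py : Prop := ∀ (opcode_name : String), Dom_opcode_to_method_name_py opcode_name → Spec_opcode_to_method_name_py opcode_name (opcode_to_method_name_py opcode_name)

-- ===== LEMMAS AND PROOFS =====

-- proof-side model of splitOn on a single-char separator: (first part, remaining parts)
def pvSplitU : List Char → List Char × List (List Char)
  | [] => ([], [])
  | c :: rest =>
    if c = '_' then ([], (pvSplitU rest).1 :: (pvSplitU rest).2)
    else (c :: (pvSplitU rest).1, (pvSplitU rest).2)

-- proof-side model of Source B's loop, emitting output front-to-back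
def pvPass : Bool → List Char → List Char
  | _, [] => []
  | start, c :: rest =>
    if c = '_' then pvPass true rest
    else if start then PySem.Chars.upperChar c :: pvPass false rest
    else PySem.Chars.lowerChar c :: pvPass false rest

theorem pvSplitU_us (rest : List Char) :
    pvSplitU ('_' :: rest) = ([], (pvSplitU rest).1 :: (pvSplitU rest).2) := by
  simp [pvSplitU]

theorem pvSplitU_cons {c : Char} (hc : c ≠ '_') (rest : List Char) :
    pvSplitU (c :: rest) = (c :: (pvSplitU rest).1, (pvSplitU rest).2) := by
  simp [pvSplitU, hc]

theorem pvPass_us (s : Bool) (rest : List Char) :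
    pvPass s ('_' :: rest) = pvPass true rest := by
  simp [pvPass]

theorem pvPass_true {c : Char} (hc : c ≠ '_') (rest : List Char) :
    pvPass true (c :: rest) = PySem.Chars.upperChar c :: pvPass false rest := by
  simp [pvPass, hc]

theorem pvPass_false {c : Char} (hc : c ≠ '_') (rest : List Char) :
    pvPass false (c :: rest) = PySem.Chars.lowerChar c :: pvPass false rest := by
  simp [pvPass, hc]

theorem pvStep_us (s : Bool × List Char) : pvStep s '_' = (true, s.2) := by
  simp [pvStep]

theorem pvStep_true {c : Char} (hc : c ≠ '_') (acc : List Char) :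
    pvStep (true, acc) c = (false, acc ++ [PySem.Chars.upperChar c]) := by
  simp [pvStep, hc]

theorem pvStep_false {c : Char} (hc : c ≠ '_') (acc : List Char) :
    pvStep (false, acc) c = (false, acc ++ [PySem.Chars.lowerChar c]) := by
  simp [pvStep, hc]

theorem pvJoin_cons (x : List Char) (xs : List (List Char)) :
    PySem.Chars.join [] (x :: xs) = x ++ PySem.Chars.join [] xs := by
  cases xs with
  | nil => simp [PySem.Chars.join, List.intercalate]
  | cons y ys => simp [PySem.Chars.join_cons_cons]

theorem pv_go_spec (l : List Char) : ∀ (fuel : Nat) (cur : List Char) (acc : List (List Char)),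
    l.length < fuel →
    PySem.Chars.splitOn.go ['_'] fuel l cur acc
      = acc.reverse ++ (cur.reverse ++ (pvSplitU l).1) :: (pvSplitU l).2 := by
  induction l with
  | nil =>
    intro fuel cur acc h
    cases fuel with
    | zero => omega
    | succ f => simp [PySem.Chars.splitOn.go, pvSplitU]
  | cons c rest ih =>
    intro fuel cur acc h
    cases fuel with
    | zero => omega
    | succ f =>
      by_cases hc : c = '_'
      · subst hc
        have hpre : List.isPrefixOf ['_'] ('_' :: rest) = true := by
          simp [List.isPrefixOf]
        rw [PySem.Chars.splitOn.go, if_pos hpre]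
        simp only [List.length_cons, List.drop_succ_cons, List.length_nil, List.drop_zero]
        rw [ih f [] (cur.reverse :: acc) (by simp only [List.length_cons] at h; omega)]
        rw [pvSplitU_us]
        simp
      · have hpre : List.isPrefixOf ['_'] (c :: rest) = false := by
          simp [List.isPrefixOf]
          exact fun h => hc h.symm
        rw [PySem.Chars.splitOn.go, if_neg (by simp [hpre])]
        rw [ih f (c :: cur) acc (by simp at h ⊢; omega)]
        rw [pvSplitU_cons hc]
        simp

theorem pv_splitOn_eq (cs : List Char) :
    PySem.Chars.splitOn cs ['_'] = (pvSplitU cs).1 :: (pvSplitU cs).2 := by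
  have := pv_go_spec cs (cs.length + 1) [] [] (by omega)
  simpa [PySem.Chars.splitOn] using this

theorem pv_join_model (cs : List Char) :
    ((pvSplitU cs).1.map PySem.Chars.lowerChar
        ++ PySem.Chars.join [] ((((pvSplitU cs).2).filter (fun p => p ≠ [])).map pvCapitalize)
      = pvPass false cs)
    ∧ (PySem.Chars.join [] (((((pvSplitU cs).1 :: (pvSplitU cs).2)).filter (fun p => p ≠ [])).map pvCapitalize)
      = pvPass true cs) := by
  induction cs with
  | nil => simp [pvSplitU, pvPass, PySem.Chars.join, List.intercalate]
  | cons c rest ih =>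
    by_cases hc : c = '_'
    · subst hc
      refine ⟨?_, ?_⟩
      · rw [pvSplitU_us, pvPass_us]
        simp only [List.map_nil, List.nil_append]
        exact ih.2
      · rw [pvSplitU_us, pvPass_us, List.filter_cons_of_neg (by simp)]
        exact ih.2
    · refine ⟨?_, ?_⟩
      · rw [pvSplitU_cons hc, pvPass_false hc]
        simp only [List.map_cons, List.cons_append]
        rw [ih.1]
      · rw [pvSplitU_cons hc, pvPass_true hc]
        simp only [List.filter_cons]
        have hne : (c :: (pvSplitU rest).1) ≠ [] := by simp
        simp only [hne, decide_true, ne_eq, not_false_iff, if_pos, List.map_cons]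
        rw [pvJoin_cons]
        simp only [pvCapitalize, List.cons_append]
        rw [ih.1]

theorem pv_foldl_pass (cs : List Char) : ∀ (s : Bool) (acc : List Char),
    (cs.foldl pvStep (s, acc)).2 = acc ++ pvPass s cs := by
  induction cs with
  | nil => intro s acc; simp [pvPass]
  | cons c rest ih =>
    intro s acc
    by_cases hc : c = '_'
    · subst hc
      rw [List.foldl_cons, pvStep_us, pvPass_us]
      exact ih true acc
    · cases s with
      | true =>
        rw [List.foldl_cons, pvStep_true hc, pvPass_true hc, ih false]
        simp
      | false =>
        rw [List.foldl_cons, pvStep_false hc, pvPass_false hc, ih false]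
        simp

-- ===== VERDICT (by name: the statement is the Claim_ definition above) =====
theorem opcode_to_method_name_py_spec : Claim_equal_opcode_to_method_name_py := by
  intro opcode_name _
  unfold Spec_opcode_to_method_name_py opcode_to_method_name_py opcode_to_method_name_py_alt
  by_cases h : opcode_name.toList = []
  · simp [h]
  · simp only [h, ite_false]
    congr 1
    rw [pv_foldl_pass _ true []]
    rw [pv_splitOn_eq]
    rw [(pv_join_model _).2]
    simp
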